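-- pv_equiv track=rewrite | github.com/jimhendy/AoC | 2020/17/a.py | extreme_cubes
-- ===== SOURCE A (Python) =====
-- def extreme_cubes(active):
--     min_x, min_y, min_z, max_x, max_y, max_z = 0, 0, 0, 0, 0, 0
--     for x, y, z in active:
--         max_x = max(x, max_x)
--         max_y = max(y, max_y)
--         max_z = max(z, max_z)
--         min_x = min(x, min_x)
--         min_y = min(y, min_y)
--         min_z = min(z, min_z)
--     return min_x, min_y, min_z, max_x, max_y, max_z
-- ===== SOURCE B (Python) =====
-- def extreme_cubes(active):
--     xs = [p[0] for p in active]
--     ys = [p[1] for p in active]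
--     zs = [p[2] for p in active]
--     return (min([0] + xs), min([0] + ys), min([0] + zs),
--             max([0] + xs), max([0] + ys), max([0] + zs))
-- ===== Notes on version B (the rewrite author's own statement) =====
-- stated objective: simpler
-- what changed: Transposes the coordinates into three axis columns and computes each extremum as a separate 0-seeded min/max reduction, instead of one interleaved loop maintaining six running extrema.
import Mathlib
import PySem

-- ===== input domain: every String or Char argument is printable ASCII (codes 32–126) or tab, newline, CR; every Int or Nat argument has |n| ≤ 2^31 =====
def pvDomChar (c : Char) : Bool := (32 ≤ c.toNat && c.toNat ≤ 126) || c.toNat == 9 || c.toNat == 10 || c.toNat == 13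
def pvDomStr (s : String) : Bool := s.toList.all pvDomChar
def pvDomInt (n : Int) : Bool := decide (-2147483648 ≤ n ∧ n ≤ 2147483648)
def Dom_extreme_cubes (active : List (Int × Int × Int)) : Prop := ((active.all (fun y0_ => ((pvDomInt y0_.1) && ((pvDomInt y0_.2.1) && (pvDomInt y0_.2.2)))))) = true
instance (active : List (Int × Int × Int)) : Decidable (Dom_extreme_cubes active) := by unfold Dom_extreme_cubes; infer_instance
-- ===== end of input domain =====

-- B transposes the coordinates into three axis columns and reduces each with a 0-seeded min/max (simpler decomposition); A keeps six running extrema in one loop.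

-- ===== PORT A =====
-- one pass updating six accumulators, branch order as in A (max first, then min)
def extreme_cubes (active : List (Int × Int × Int)) : Int × Int × Int × Int × Int × Int :=
  let s := active.foldl
    (fun (st : Int × Int × Int × Int × Int × Int) p =>
      let (x, y, z) := p
      let (min_x, min_y, min_z, max_x, max_y, max_z) := st
      let max_x := max x max_x
      let max_y := max y max_y
      let max_z := max z max_z
      let min_x := min x min_x
      let min_y := min y min_y
      let min_z := min z min_z
      (min_x, min_y, min_z, max_x, max_y, max_z))
    (0, 0, 0, 0, 0, 0)
  s

-- ===== PORT B =====
-- min([0]+xs) in Python = left fold of min over xs seeded with 0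
def extreme_cubes_alt (active : List (Int × Int × Int)) : Int × Int × Int × Int × Int × Int :=
  let xs := active.map (fun p => p.1)
  let ys := active.map (fun p => p.2.1)
  let zs := active.map (fun p => p.2.2)
  (xs.foldl min 0, ys.foldl min 0, zs.foldl min 0,
   xs.foldl max 0, ys.foldl max 0, zs.foldl max 0)

-- ===== PRECONDITION & SPEC =====
def Spec_extreme_cubes (active : List (Int × Int × Int)) (out : Int × Int × Int × Int × Int × Int) : Prop := out = extreme_cubes_alt active
instance (active : List (Int × Int × Int)) (out : Int × Int × Int × Int × Int × Int) : Decidable (Spec_extreme_cubes active out) := by unfold Spec_extreme_cubes; infer_instance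

-- ===== CLAIM (what is proved, stated in full; the proofs are below) =====
def Claim_equal_extreme_cubes : Prop := ∀ (active : List (Int × Int × Int)), Dom_extreme_cubes active → Spec_extreme_cubes active (extreme_cubes active)

-- ===== LEMMAS AND PROOFS =====

-- invariant: A's six-accumulator fold equals the six per-axis folds from the same seeds
theorem extreme_cubes_fold_eq (l : List (Int × Int × Int))
    (a b c d e f : Int) :
    l.foldl
      (fun (st : Int × Int × Int × Int × Int × Int) p =>
        let (x, y, z) := p
        let (min_x, min_y, min_z, max_x, max_y, max_z) := st
        let max_x := max x max_x
        let max_y := max y max_y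
        let max_z := max z max_z
        let min_x := min x min_x
        let min_y := min y min_y
        let min_z := min z min_z
        (min_x, min_y, min_z, max_x, max_y, max_z))
      (a, b, c, d, e, f)
    = ((l.map (fun p => p.1)).foldl min a,
       (l.map (fun p => p.2.1)).foldl min b,
       (l.map (fun p => p.2.2)).foldl min c,
       (l.map (fun p => p.1)).foldl max d,
       (l.map (fun p => p.2.1)).foldl max e,
       (l.map (fun p => p.2.2)).foldl max f) := by
  induction l generalizing a b c d e f with
  | nil => rfl
  | cons p t ih =>
      obtain ⟨x, y, z⟩ := p
      simp only [List.foldl_cons, List.map_cons]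
      rw [ih]
      simp [min_comm, max_comm]

theorem extreme_cubes_spec : Claim_equal_extreme_cubes := by
  intro active _
  show extreme_cubes active = extreme_cubes_alt active
  unfold extreme_cubes extreme_cubes_alt
  exact extreme_cubes_fold_eq active 0 0 0 0 0 0
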